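-- pv_equiv track=rewrite | github.com/Benmoshangsang/Brand-Model-Classification-and-Bolt-Detection-in-Pre-Disassembly-Inspection-of-EV-Battery-Packs | mamba_vision.py | _diag_indices
-- ===== SOURCE A (Python) =====
-- def _diag_indices(w: int):
--     # Generate (row, col) indices in main diagonal order
--     # and then flatten them into token indices
--     inds = []
--     for s in range(2*w-1):
--         row_start = max(0, s-(w-1))
--         row_end = min(w-1, s)
--         line = []
--         for r in range(row_start, row_end+1):
--             c = s - r
--             line.append((r, c))
--         inds.extend(line)
--     return inds
-- ===== SOURCE B (Python) =====
-- def _diag_indices(w: int):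
--     # Bucket the full grid by anti-diagonal (r+c), then flatten buckets in order.
--     buckets = {}
--     for r in range(w):
--         for c in range(w):
--             buckets.setdefault(r + c, []).append((r, c))
--     out = []
--     for s in range(2 * w - 1):
--         out.extend(buckets.get(s, []))
--     return out
-- ===== Notes on version B (the rewrite author's own statement) =====
-- stated objective: alternative
-- what changed: Replaces A's per-diagonal endpoint computation (row_start/row_end via max/min) with a single full-grid scan that groups every cell (r,c) into a bucket keyed by its anti-diagonal r+c, then concatenates the buckets in diagonal order.
import Mathlib
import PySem

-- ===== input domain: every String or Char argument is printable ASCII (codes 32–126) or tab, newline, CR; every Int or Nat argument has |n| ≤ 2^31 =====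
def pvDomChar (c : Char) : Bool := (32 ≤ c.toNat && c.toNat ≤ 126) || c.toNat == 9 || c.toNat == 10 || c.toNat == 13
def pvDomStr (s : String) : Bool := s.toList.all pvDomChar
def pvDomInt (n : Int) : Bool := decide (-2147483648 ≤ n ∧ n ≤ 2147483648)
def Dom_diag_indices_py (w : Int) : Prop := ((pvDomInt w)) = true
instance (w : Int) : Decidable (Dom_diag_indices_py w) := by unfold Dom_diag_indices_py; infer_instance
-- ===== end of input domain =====

-- B groups grid cells into per-diagonal buckets by a full-grid scan instead of A's
-- per-diagonal endpoint computation (alternative decomposition, same cost).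

-- ===== PORT A =====
def diag_indices_py (w : Int) : List (Int × Int) :=
  (PySem.List.pyRange 0 (2 * w - 1) 1).foldl
    (fun inds s =>
      inds ++ (PySem.List.pyRange (max 0 (s - (w - 1))) (min (w - 1) s + 1) 1).foldl
        (fun line r => line ++ [(r, s - r)]) [])
    []

-- ===== PORT B =====
def diag_indices_py_alt (w : Int) : List (Int × Int) :=
  let buckets :=
    (PySem.List.pyRange 0 w 1).foldl
      (fun d r =>
        (PySem.List.pyRange 0 w 1).foldl
          (fun d c => d.modify (r + c) [] (fun b => b ++ [(r, c)])) d)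
      (PySem.Dict.empty : PySem.Dict Int (List (Int × Int)))
  (PySem.List.pyRange 0 (2 * w - 1) 1).foldl
    (fun out s => out ++ buckets.getD s []) []

-- ===== PRECONDITION & SPEC =====
def Spec_diag_indices_py (w : Int) (out : List (Int × Int)) : Prop := out = diag_indices_py_alt w
instance (w : Int) (out : List (Int × Int)) : Decidable (Spec_diag_indices_py w out) := by unfold Spec_diag_indices_py; infer_instance

-- ===== CLAIM (what is proved, stated in full; the proofs are below) =====
def Claim_equal_diag_indices_py : Prop := ∀ (w : Int), Dom_diag_indices_py w → Spec_diag_indices_py w (diag_indices_py w)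

-- ===== LEMMAS AND PROOFS =====

-- the filter that picks, from one grid row r, the unique column on diagonal s
theorem pv_filter_key (w r s : Int) :
    (PySem.List.pyRange 0 w 1).filter (fun c => r + c == s) =
      if 0 ≤ s - r ∧ s - r < w then [s - r] else [] := by
  split_ifs with h
  · have e1 : (PySem.List.pyRange 0 (s - r) 1).filter (fun c => r + c == s) = [] := by
      apply List.filter_eq_nil_iff.2
      intro c hc
      have := PySem.List.mem_pyRange_one.1 hc
      simp only [beq_iff_eq]; omega
    have e2 : (PySem.List.pyRange (s - r + 1) w 1).filter (fun c => r + c == s) = [] := by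
      apply List.filter_eq_nil_iff.2
      intro c hc
      have := PySem.List.mem_pyRange_one.1 hc
      simp only [beq_iff_eq]; omega
    rw [PySem.List.pyRange_one_append 0 (s - r) w (by omega) (by omega),
        PySem.List.pyRange_one_append (s - r) (s - r + 1) w (by omega) (by omega),
        PySem.List.pyRange_one_singleton]
    simp only [List.filter_append, e1, e2, List.filter_singleton]
    simp
  · apply List.filter_eq_nil_iff.2
    intro c hc
    have := PySem.List.mem_pyRange_one.1 hc
    simp only [beq_iff_eq]; omega

-- one bucket of B's grouped grid scan is exactly A's diagonal line s
theorem pv_bucket_eq (w s : Int) (h0 : 0 ≤ s) (h1 : s < 2 * w - 1) :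
    ((((PySem.List.pyRange 0 w 1).flatMap
        (fun r => (PySem.List.pyRange 0 w 1).map (fun c => (r + c, (r, c))))).filter
          (fun p => p.1 == s)).map (·.2))
      = (PySem.List.pyRange (max 0 (s - (w - 1))) (min (w - 1) s + 1) 1).map
          (fun r => (r, s - r)) := by
  rw [List.filter_flatMap, List.map_flatMap]
  have hstep : ∀ r : Int,
      ((((PySem.List.pyRange 0 w 1).map (fun c => (r + c, (r, c)))).filter
          (fun p => p.1 == s)).map (·.2))
        = if 0 ≤ s - r ∧ s - r < w then [(r, s - r)] else [] := by
    intro r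
    rw [List.filter_map, List.map_map]
    have : (PySem.List.pyRange 0 w 1).filter ((fun p : Int × (Int × Int) => p.1 == s) ∘
        (fun c => (r + c, (r, c)))) = (PySem.List.pyRange 0 w 1).filter (fun c => r + c == s) := rfl
    rw [this, pv_filter_key]
    split_ifs with h <;> simp
  calc ((PySem.List.pyRange 0 w 1).flatMap fun r =>
          (((PySem.List.pyRange 0 w 1).map (fun c => (r + c, (r, c)))).filter
            (fun p => p.1 == s)).map (·.2))
      = (PySem.List.pyRange 0 w 1).flatMap
          (fun r => if 0 ≤ s - r ∧ s - r < w then [(r, s - r)] else []) := by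
        exact List.flatMap_congr (fun r _ => hstep r)
    _ = (PySem.List.pyRange (max 0 (s - (w - 1))) (min (w - 1) s + 1) 1).map
          (fun r => (r, s - r)) := by
        have e1 : (PySem.List.pyRange 0 (max 0 (s - (w - 1))) 1).flatMap
            (fun r => if 0 ≤ s - r ∧ s - r < w then [(r, s - r)] else []) = [] := by
          apply List.flatMap_eq_nil_iff.2
          intro r hr
          have := PySem.List.mem_pyRange_one.1 hr
          rw [if_neg (by omega)]
        have e2 : (PySem.List.pyRange (min (w - 1) s + 1) w 1).flatMap
            (fun r => if 0 ≤ s - r ∧ s - r < w then [(r, s - r)] else []) = [] := by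
          apply List.flatMap_eq_nil_iff.2
          intro r hr
          have := PySem.List.mem_pyRange_one.1 hr
          rw [if_neg (by omega)]
        rw [PySem.List.pyRange_one_append 0 (max 0 (s - (w - 1))) w (by omega) (by omega),
            PySem.List.pyRange_one_append (max 0 (s - (w - 1))) (min (w - 1) s + 1) w
              (by omega) (by omega)]
        simp only [List.flatMap_append, e1, e2, List.nil_append, List.append_nil]
        rw [List.flatMap_congr (g := fun r => [(r, s - r)]) (by
              intro r hr
              have := PySem.List.mem_pyRange_one.1 hr
              rw [if_pos (by omega)])]
        exact List.map_eq_flatMap.symm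

-- B's nested per-row/per-column fold is the single fold over the flattened grid
theorem pv_nested_fold (w : Int) :
    ((PySem.List.pyRange 0 w 1).foldl
        (fun d r => (PySem.List.pyRange 0 w 1).foldl
          (fun d c => d.modify (r + c) [] (fun b => b ++ [(r, c)])) d)
        (PySem.Dict.empty : PySem.Dict Int (List (Int × Int))))
      = ((PySem.List.pyRange 0 w 1).flatMap
          (fun r => (PySem.List.pyRange 0 w 1).map (fun c => (r + c, (r, c))))).foldl
          (fun d p => d.modify p.1 [] (fun b => b ++ [p.2])) PySem.Dict.empty := by
  rw [List.foldl_flatMap]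
  simp only [List.foldl_map]

-- ===== VERDICT (by name: the statement is the Claim_ definition above) =====
theorem diag_indices_py_spec : Claim_equal_diag_indices_py := by
  intro w _
  unfold Spec_diag_indices_py diag_indices_py diag_indices_py_alt
  rw [pv_nested_fold]
  rw [PySem.List.foldl_append_eq_flatMap, PySem.List.foldl_append_eq_flatMap]
  simp only [List.nil_append, PySem.List.foldl_append_singleton_eq_map]
  apply List.flatMap_congr
  intro s hs
  have hb := PySem.List.mem_pyRange_one.1 hs
  rw [PySem.Dict.getD_foldl_modify_append, PySem.Dict.getD_empty, List.nil_append,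
      pv_bucket_eq w s hb.1 hb.2]
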